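-- pv_equiv track=rewrite | github.com/jaceiverson/aoc-solutions | 2015/solutions/day13.py | get_happiness_score
-- ===== SOURCE A (Python) =====
-- def get_happiness_score(guests: dict, guest_order: list) -> int:
--     happiness = 0
--     for idx, person in enumerate(guest_order):
--         down_neighbor = guest_order[(idx - 1)]
--         up_neighbor = guest_order[((idx + 1) % len(guest_order))]
--         happiness += guests[person][down_neighbor]
--         happiness += guests[person][up_neighbor]
--     return happiness
-- ===== SOURCE B (Python) =====
-- def get_happiness_score(guests: dict, guest_order: list) -> int:
--     n = len(guest_order)
--     incidences = [
--         (guest_order[i], guest_order[j])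
--         for i in range(n)
--         for j in ((i - 1) % n, (i + 1) % n)
--     ]
--     weight = {}
--     for pair in incidences:
--         weight[pair] = weight.get(pair, 0) + 1
--     return sum(guests[p][q] * w for (p, q), w in weight.items())
-- ===== Notes on version B (the rewrite author's own statement) =====
-- stated objective: alternative
-- what changed: B works in three stages — list every directed adjacency incidence of the circular order, count multiplicities into a dict, then return a weighted sum guests[p][q]*count over the dict's items — instead of A's single running-accumulator loop that looks up both neighbors per person.
import Mathlib
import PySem

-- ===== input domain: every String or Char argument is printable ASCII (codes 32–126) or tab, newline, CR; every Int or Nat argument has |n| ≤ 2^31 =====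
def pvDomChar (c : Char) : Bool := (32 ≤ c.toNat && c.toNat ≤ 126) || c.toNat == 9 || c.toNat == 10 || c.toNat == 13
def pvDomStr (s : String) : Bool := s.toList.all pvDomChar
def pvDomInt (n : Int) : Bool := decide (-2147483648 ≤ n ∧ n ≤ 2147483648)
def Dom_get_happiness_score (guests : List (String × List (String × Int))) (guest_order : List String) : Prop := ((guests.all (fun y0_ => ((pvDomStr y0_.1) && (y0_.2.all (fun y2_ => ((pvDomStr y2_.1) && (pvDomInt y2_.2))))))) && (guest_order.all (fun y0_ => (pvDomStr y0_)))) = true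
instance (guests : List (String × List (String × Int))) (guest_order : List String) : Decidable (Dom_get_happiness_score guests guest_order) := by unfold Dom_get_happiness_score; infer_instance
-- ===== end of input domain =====

-- B stages the work: it lists every directed adjacency incidence, counts multiplicities in a
-- dict, then sums guests[p][q] * weight over the dict's items, replacing A's running
-- accumulator over per-person neighbor lookups; objective: alternative.

-- guests[p][q] (KeyErrors are excluded by Pre_, where the lookup defaults never fire)
def pvLook (guests : List (String × List (String × Int))) (p q : String) : Int :=
  (((guests.lookup p).getD []).lookup q).getD 0

-- ===== PORT A =====
def get_happiness_score (guests : List (String × List (String × Int))) (guest_order : List String) : Int :=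
  (PySem.List.enumerate guest_order).foldl
    (fun happiness ip =>
      let down_neighbor := PySem.List.pyGetD guest_order (ip.1 - 1) ""
      let up_neighbor := PySem.List.pyGetD guest_order (PySem.Int.mod (ip.1 + 1) (guest_order.length : Int)) ""
      happiness + pvLook guests ip.2 down_neighbor + pvLook guests ip.2 up_neighbor) 0

-- ===== PORT B =====
def get_happiness_score_alt (guests : List (String × List (String × Int))) (guest_order : List String) : Int :=
  let n : Int := (guest_order.length : Int)
  let incidences := (PySem.List.pyRange 0 n 1).flatMap (fun i =>
    [(PySem.List.pyGetD guest_order i "", PySem.List.pyGetD guest_order (PySem.Int.mod (i - 1) n) ""),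
     (PySem.List.pyGetD guest_order i "", PySem.List.pyGetD guest_order (PySem.Int.mod (i + 1) n) "")])
  let weight := incidences.foldl (fun d pair => d.insert pair (d.getD pair 0 + 1)) PySem.Dict.empty
  (weight.items.map (fun pw => pvLook guests pw.1.1 pw.1.2 * pw.2)).sum

-- ===== PRECONDITION & SPEC =====
def pvOk (guests : List (String × List (String × Int))) (p q : String) : Prop :=
  ((guests.lookup p).bind (fun d => d.lookup q)).isSome = true

-- Pre_ excludes exactly the inputs on which A raises KeyError: some person in the order
-- is missing from guests, or a person's dict is missing one of its two circular neighbors.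
def Pre_get_happiness_score (guests : List (String × List (String × Int))) (guest_order : List String) : Prop :=
  ∀ i < guest_order.length,
    pvOk guests (guest_order.getD i "")
      (guest_order.getD ((i + guest_order.length - 1) % guest_order.length) "") ∧
    pvOk guests (guest_order.getD i "")
      (guest_order.getD ((i + 1) % guest_order.length) "")

instance (guests : List (String × List (String × Int))) (guest_order : List String) : Decidable (Pre_get_happiness_score guests guest_order) := by
  unfold Pre_get_happiness_score pvOk; infer_instance

def pvWitness_get_happiness_score : (List (String × List (String × Int))) × List String :=
  ([("A", [("B", 1)]), ("B", [("A", 2)])], ["A", "B"])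

def Spec_get_happiness_score (guests : List (String × List (String × Int))) (guest_order : List String) (out : Int) : Prop := out = get_happiness_score_alt guests guest_order
instance (guests : List (String × List (String × Int))) (guest_order : List String) (out : Int) : Decidable (Spec_get_happiness_score guests guest_order out) := by unfold Spec_get_happiness_score; infer_instance

-- ===== CLAIM (what is proved, stated in full; the proofs are below) =====
def Claim_equal_get_happiness_score : Prop := ∀ (guests : List (String × List (String × Int))) (guest_order : List String), Dom_get_happiness_score guests guest_order → Pre_get_happiness_score guests guest_order → Spec_get_happiness_score guests guest_order (get_happiness_score guests guest_order)

-- ===== LEMMAS AND PROOFS =====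

theorem pv_mod_pred {n i : Nat} (h : i < n) : (i + n - 1) % n = if i = 0 then n - 1 else i - 1 := by
  split
  · subst ‹i = 0›; rw [Nat.zero_add]; exact Nat.mod_eq_of_lt (by omega)
  · have : i + n - 1 = (i - 1) + n := by omega
    rw [this, Nat.add_mod_right]
    exact Nat.mod_eq_of_lt (by omega)

-- Python's (i - 1) % n for 0 ≤ i < n, stated over Nat indices
theorem pv_int_mod_pred {n i : Nat} (h : i < n) :
    PySem.Int.mod ((i : Int) - 1) (n : Int) = (((i + n - 1) % n : Nat) : Int) := by
  rw [PySem.Int.mod_eq_emod_of_pos (by omega)]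
  have : ((i : Int) - 1) % (n : Int) = (((i : Int) - 1) + n) % n := by
    rw [Int.add_emod_right]
  rw [this]
  have hcast : ((i : Int) - 1) + n = ((i + n - 1 : Nat) : Int) := by omega
  rw [hcast]
  exact (Int.natCast_mod _ _).symm

-- A's result as a sum over positions
theorem A_char (guests : List (String × List (String × Int))) (order : List String) :
    get_happiness_score guests order =
    ((List.range order.length).map (fun i =>
      pvLook guests (order.getD i "") (order.getD ((i + order.length - 1) % order.length) "") +
      pvLook guests (order.getD i "") (order.getD ((i + 1) % order.length) ""))).sum := by
  unfold get_happiness_score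
  rw [PySem.List.enumerate_eq_map_pyRange order ""]
  rw [List.foldl_map, PySem.List.pyRange_one]
  rw [List.foldl_map]
  simp only [PySem.List.len_eq, Int.sub_zero, Int.toNat_natCast, zero_add]
  simp only [add_assoc]
  rw [PySem.List.foldl_add, zero_add]
  congr 1
  apply List.map_congr_left
  intro k hk
  rw [List.mem_range] at hk
  have hne : order ≠ [] := by intro h; simp [h] at hk
  have hgetk : PySem.List.pyGetD order (↑k) "" = order.getD k "" := by simp
  have hup : PySem.List.pyGetD order (PySem.Int.mod (↑k + 1) ↑order.length) "" = order.getD ((k+1) % order.length) "" := by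
    rw [show ((k:Int) + 1) = ((k+1 : Nat) : Int) by push_cast; ring, PySem.Int.mod_natCast,
      PySem.List.pyGetD_natCast]
  have hdown : PySem.List.pyGetD order ((k:Int) - 1) "" = order.getD ((k + order.length - 1) % order.length) "" := by
    rcases Nat.eq_zero_or_pos k with hk0 | hk1
    · subst hk0
      rw [pv_mod_pred hk, if_pos rfl]
      rw [show ((0:Nat):Int) - 1 = -1 by simp, PySem.List.pyGetD_neg_one order "" hne]
      rw [List.getLast_eq_getElem, List.getD_eq_getElem _ _ (by omega)]
    · rw [show ((k:Int) - 1) = ((k - 1 : Nat) : Int) by omega, pv_mod_pred hk, if_neg (by omega)]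
      simp
  rw [hgetk, hup, hdown]

-- grouping: a weighted sum over the distinct elements (with their multiplicities) is the plain sum
theorem pv_sum_ite_single {α : Type} [BEq α] [LawfulBEq α] (s : List α) (f : α → Int) (x : α)
    (hnd : s.Nodup) (hx : x ∈ s) :
    (s.map (fun k => if k == x then f k else 0)).sum = f x := by
  induction s with
  | nil => cases hx
  | cons b t ih =>
    rcases List.nodup_cons.mp hnd with ⟨hb, hndt⟩
    rcases List.mem_cons.mp hx with h | h
    · subst h
      have hz : (t.map (fun k => if k == x then f k else 0)).sum = 0 := by
        apply List.sum_eq_zero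
        intro y hy
        rcases List.mem_map.mp hy with ⟨k, hk, hky⟩
        have hkx : (k == x) = false := by
          apply beq_false_of_ne
          intro e; exact hb (e ▸ hk)
        rw [← hky, hkx, if_neg (by simp)]
      simp [hz]
    · have hbx : (b == x) = false := by
        apply beq_false_of_ne
        intro e; exact hb (e ▸ h)
      simp only [List.map_cons, List.sum_cons, hbx, if_neg (by simp : ¬ (false = true))]
      rw [ih hndt h, zero_add]

theorem pv_sum_count {α : Type} [BEq α] [LawfulBEq α] (xs s : List α) (f : α → Int)
    (hnd : s.Nodup) (hmem : ∀ x ∈ xs, x ∈ s) :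
    (s.map (fun k => f k * (xs.count k : Int))).sum = (xs.map f).sum := by
  induction xs with
  | nil => simp
  | cons x t ih =>
    have hx : x ∈ s := hmem x List.mem_cons_self
    have hsplit :
        (s.map (fun k => f k * ((x :: t).count k : Int))).sum =
        (s.map (fun k => f k * (t.count k : Int))).sum +
        (s.map (fun k => if k == x then f k else 0)).sum := by
      rw [← List.sum_map_add]
      apply congrArg
      apply List.map_congr_left
      intro k hk
      by_cases hkx : k = x
      · subst hkx
        rw [List.count_cons_self, if_pos (by simp)]
        push_cast; ring
      · simp only [List.count_cons]
        rw [if_neg (by simp only [beq_iff_eq]; exact fun e => hkx e.symm),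
          if_neg (by simp only [beq_iff_eq]; exact hkx)]
        push_cast; ring
    rw [hsplit, pv_sum_ite_single s f x hnd hx,
      ih (fun y hy => hmem y (List.mem_cons_of_mem x hy))]
    simp [add_comm]

-- B's result as a sum over positions, in exactly A_char's shape
theorem B_char (guests : List (String × List (String × Int))) (order : List String) :
    get_happiness_score_alt guests order =
    ((List.range order.length).map (fun i =>
      pvLook guests (order.getD i "") (order.getD ((i + order.length - 1) % order.length) "") +
      pvLook guests (order.getD i "") (order.getD ((i + 1) % order.length) ""))).sum := by
  simp only [get_happiness_score_alt]
  rw [PySem.Dict.foldl_insert_getD_add_one_eq_counter]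
  rw [PySem.Dict.items_counter]
  rw [List.map_map]
  have := pv_sum_count
    ((PySem.List.pyRange 0 (order.length : Int) 1).flatMap (fun i =>
      [(PySem.List.pyGetD order i "", PySem.List.pyGetD order (PySem.Int.mod (i - 1) (order.length : Int)) ""),
       (PySem.List.pyGetD order i "", PySem.List.pyGetD order (PySem.Int.mod (i + 1) (order.length : Int)) "")]))
    (PySem.Set.ofList
      ((PySem.List.pyRange 0 (order.length : Int) 1).flatMap (fun i =>
        [(PySem.List.pyGetD order i "", PySem.List.pyGetD order (PySem.Int.mod (i - 1) (order.length : Int)) ""),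
         (PySem.List.pyGetD order i "", PySem.List.pyGetD order (PySem.Int.mod (i + 1) (order.length : Int)) "")])))
    (fun k => pvLook guests k.1 k.2)
    (PySem.Set.nodup_ofList _)
    (fun x hx => (PySem.Set.mem_ofList _ _).mpr hx)
  simp only [Function.comp_def] at this ⊢
  rw [this]
  rw [List.map_flatMap]
  rw [List.flatMap_def, List.sum_flatten, List.map_map]
  rw [PySem.List.pyRange_one]
  simp only [Int.sub_zero, Int.toNat_natCast, zero_add]
  rw [List.map_map]
  apply congrArg
  apply List.map_congr_left
  intro k hk
  rw [List.mem_range] at hk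
  have hne : order ≠ [] := by intro h; simp [h] at hk
  have hgetk : PySem.List.pyGetD order (↑k) "" = order.getD k "" := by simp
  have hup : PySem.List.pyGetD order (PySem.Int.mod (↑k + 1) ↑order.length) "" = order.getD ((k+1) % order.length) "" := by
    rw [show ((k:Int) + 1) = ((k+1 : Nat) : Int) by push_cast; ring, PySem.Int.mod_natCast,
      PySem.List.pyGetD_natCast]
  have hdown : PySem.List.pyGetD order (PySem.Int.mod ((k:Int) - 1) ↑order.length) ""
      = order.getD ((k + order.length - 1) % order.length) "" := by
    rw [pv_int_mod_pred hk, PySem.List.pyGetD_natCast]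
  simp only [Function.comp_def, List.map_cons, List.map_nil, List.sum_cons, List.sum_nil]
  rw [hgetk, hup, hdown]
  ring

-- ===== VERDICT (by name: the statement is the Claim_ definition above) =====
theorem get_happiness_score_spec : Claim_equal_get_happiness_score := by
  intro guests order _hdom _hpre
  unfold Spec_get_happiness_score
  rw [A_char, B_char]
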